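-- pv_equiv track=rewrite | github.com/seanlaidlaw/beacon | beacon/search/capsule.py | _file_path_to_module
-- ===== SOURCE A (Python) =====
-- def _file_path_to_module(file_path: str) -> list[str]:
--     """Convert a relative file path to candidate Python module dot-paths.
--
--     e.g. "django/db/models/signals.py" → ["django.db.models.signals",
--                                            "db.models.signals", "models.signals"]
--     Returns multiple candidates (package subsets) to handle partial imports.
--     """
--     p = file_path.replace("\\", "/")
--     if p.endswith(".py"):
--         p = p[:-3]
--     parts = p.split("/")
--     # Remove common package root prefixes (src/, lib/, etc.)
--     if parts[0] in ("src", "lib", "pkg"):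
--         parts = parts[1:]
--     # Generate suffix candidates: "a.b.c", "b.c", "c"
--     candidates = []
--     for i in range(len(parts)):
--         candidates.append(".".join(parts[i:]))
--     return candidates
-- ===== SOURCE B (Python) =====
-- def _file_path_to_module(file_path: str) -> list[str]:
--     p = file_path.replace("\\", "/")
--     if p.endswith(".py"):
--         p = p[:-3]
--     parts = p.split("/")
--     if parts[0] in ("src", "lib", "pkg"):
--         parts = parts[1:]
--     # single reverse pass maintaining the running dotted suffix
--     out = []
--     acc = None
--     for part in reversed(parts):
--         acc = part if acc is None else part + "." + acc
--         out.append(acc)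
--     out.reverse()
--     return out
-- ===== Notes on version B (the rewrite author's own statement) =====
-- stated objective: simpler
-- what changed: Instead of re-joining parts[i:] independently for every start index, B walks the parts once in reverse maintaining the running dotted suffix (acc = part + '.' + acc), collecting candidates and reversing at the end.
import Mathlib
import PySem

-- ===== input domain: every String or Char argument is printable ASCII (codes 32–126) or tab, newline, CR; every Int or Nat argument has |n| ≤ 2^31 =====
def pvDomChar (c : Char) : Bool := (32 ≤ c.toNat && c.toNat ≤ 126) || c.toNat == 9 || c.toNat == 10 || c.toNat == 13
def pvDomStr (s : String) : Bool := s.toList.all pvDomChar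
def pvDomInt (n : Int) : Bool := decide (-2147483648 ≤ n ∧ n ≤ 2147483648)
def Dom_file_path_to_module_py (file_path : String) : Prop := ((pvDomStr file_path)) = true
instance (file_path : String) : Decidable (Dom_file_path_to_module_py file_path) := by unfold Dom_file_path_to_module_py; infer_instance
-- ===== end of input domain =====

-- B replaces the per-index re-joins with one reverse pass that maintains the running dotted suffix (objective: simpler decomposition; no speed claim).

-- ===== PORT A =====
def file_path_to_module_py (file_path : String) : List String :=
  let p := PySem.Str.replace file_path "\\" "/"
  let p := if PySem.Str.endswith p ".py" then PySem.Str.slice p none (some (-3)) else p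
  let parts := (PySem.Str.split? p "/").getD []
  let parts := if PySem.List.pyGet? parts 0 ∈ [some "src", some "lib", some "pkg"]
               then PySem.List.slice parts (some 1) none else parts
  (PySem.List.pyRange 0 parts.length 1).foldl
    (fun candidates i => candidates ++ [PySem.Str.join "." (PySem.List.slice parts (some i) none)]) []

-- ===== PORT B =====
-- one step of B's reverse loop: combine the part with the running suffix (None before the first step) and append
def pvStepB (st : List String × Option String) (part : String) : List String × Option String :=
  let acc := match st.2 with
    | none => part
    | some a => part ++ "." ++ a
  (st.1 ++ [acc], some acc)

def file_path_to_module_py_alt (file_path : String) : List String :=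
  let p := PySem.Str.replace file_path "\\" "/"
  let p := if PySem.Str.endswith p ".py" then PySem.Str.slice p none (some (-3)) else p
  let parts := (PySem.Str.split? p "/").getD []
  let parts := if PySem.List.pyGet? parts 0 ∈ [some "src", some "lib", some "pkg"]
               then PySem.List.slice parts (some 1) none else parts
  (parts.reverse.foldl pvStepB ([], none)).1.reverse

-- ===== PRECONDITION & SPEC =====
def Spec_file_path_to_module_py (file_path : String) (out : List String) : Prop := out = file_path_to_module_py_alt file_path
instance (file_path : String) (out : List String) : Decidable (Spec_file_path_to_module_py file_path out) := by unfold Spec_file_path_to_module_py; infer_instance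

-- ===== CLAIM (what is proved, stated in full; the proofs are below) =====
def Claim_equal_file_path_to_module_py : Prop := ∀ (file_path : String), Dom_file_path_to_module_py file_path → Spec_file_path_to_module_py file_path (file_path_to_module_py file_path)

-- ===== LEMMAS AND PROOFS =====

-- dotted join, abbreviation for the proofs
def pvJ (l : List String) : String := PySem.Str.join "." l

lemma pvJ_singleton (a : String) : pvJ [a] = a := by
  simp [pvJ, PySem.Str.join, PySem.Chars.join, List.intercalate]

lemma pvJ_cons_cons (a b : String) (t : List String) :
    pvJ (a :: b :: t) = a ++ "." ++ pvJ (b :: t) := by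
  simp [pvJ, PySem.Str.join, PySem.Chars.join, List.intercalate]
  rw [show ('.' :: (List.intersperse ['.'] (b.toList :: List.map String.toList t)).flatten)
        = ['.'] ++ (List.intersperse ['.'] (b.toList :: List.map String.toList t)).flatten from rfl]
  rw [String.ofList_append, ← String.append_assoc]

-- invariant of B's reverse fold
lemma pvB_fold (parts : List String) :
    parts.reverse.foldl pvStepB ([], none)
      = ((List.range parts.length).reverse.map (fun k => pvJ (parts.drop k)),
         if parts = [] then none else some (pvJ parts)) := by
  induction parts with
  | nil => simp
  | cons p rest ih =>
    rw [List.reverse_cons, List.foldl_append, ih]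
    cases rest with
    | nil => simp [pvStepB, pvJ_singleton]
    | cons b t =>
      simp only [List.foldl_cons, List.foldl_nil, pvStepB, reduceCtorEq, ite_false,
        List.length_cons]
      rw [← pvJ_cons_cons]
      refine Prod.ext ?_ rfl
      show List.map (fun k => pvJ (List.drop k (b :: t))) (List.range (t.length + 1)).reverse
             ++ [pvJ (p :: b :: t)]
         = List.map (fun k => pvJ (List.drop k (p :: b :: t))) (List.range (t.length + 1 + 1)).reverse
      conv_rhs => rw [List.range_succ_eq_map]
      simp only [List.reverse_cons, List.map_append, List.map_reverse, List.map_map,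
        List.map_cons, List.map_nil, List.drop_zero]
      congr 2

lemma pvLoops_eq (parts : List String) :
    (PySem.List.pyRange 0 parts.length 1).foldl
        (fun candidates i => candidates ++ [PySem.Str.join "." (PySem.List.slice parts (some i) none)]) []
      = ((parts.reverse.foldl pvStepB ([], none)).1).reverse := by
  rw [pvB_fold, PySem.List.foldl_append_singleton_eq_map, PySem.List.pyRange_one, List.map_map]
  simp only [List.map_reverse, List.reverse_reverse, List.nil_append]
  apply List.map_congr_left
  intro k hk
  simp [pvJ, PySem.List.slice_from_natCast]

-- ===== VERDICT (by name: the statement is the Claim_ definition above) =====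
theorem file_path_to_module_py_spec : Claim_equal_file_path_to_module_py := by
  intro fp _
  unfold Spec_file_path_to_module_py file_path_to_module_py file_path_to_module_py_alt
  exact pvLoops_eq _
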